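-- pv_equiv track=rewrite | github.com/izag8216/docsmith | src/docsmith/docstring.py | _extract_google_args
-- ===== SOURCE A (Python) =====
-- def _extract_google_args(lines: list[str]) -> list[tuple[str, str]]:
--     """Extract argument descriptions from Google-style args section."""
--     args = []
--     current_arg = None
--     current_desc = []
--
--     for line in lines:
--         stripped = line.strip()
--         if not stripped:
--             continue
--
--         if ":" in stripped:
--             if current_arg:
--                 args.append((current_arg, " ".join(current_desc).strip()))
--             parts = stripped.split(":", 1)
--             current_arg = parts[0].strip()
--             current_desc = [parts[1].strip()] if len(parts) > 1 and parts[1].strip() else []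
--         elif current_arg:
--             current_desc.append(stripped)
--
--     if current_arg:
--         args.append((current_arg, " ".join(current_desc).strip()))
--
--     return args
-- ===== SOURCE B (Python) =====
-- def _extract_google_args(lines: list[str]) -> list[tuple[str, str]]:
--     """Extract argument descriptions from Google-style args section."""
--     # Walk the lines bottom-up: description lines pile up in `pending` until
--     # their ':' header line appears above them; pending lines left over at the
--     # top (before any header) simply vanish.  Output is built back-to-front.
--     out = []
--     pending = []
--     for raw in reversed(lines):
--         s = raw.strip()
--         if not s:
--             continue
--         if ":" in s:
--             name, _, frag = s.partition(":")
--             name = name.strip()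
--             if name:
--                 out.append((name, " ".join([frag.strip()] + pending[::-1]).strip()))
--             pending = []
--         else:
--             pending.append(s)
--     return out[::-1]
-- ===== Notes on version B (the rewrite author's own statement) =====
-- stated objective: alternative
-- what changed: Replaces A's top-down state machine (current_arg/current_desc flushed at each colon line and once more after the loop) by a bottom-up traversal: walk the lines in reverse, pile description lines onto a pending stack, emit a finished (name, desc) pair the moment the matching colon header appears above, and reverse the output at the end — leading junk lines and the end-of-loop flush special case disappear.
import Mathlib
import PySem

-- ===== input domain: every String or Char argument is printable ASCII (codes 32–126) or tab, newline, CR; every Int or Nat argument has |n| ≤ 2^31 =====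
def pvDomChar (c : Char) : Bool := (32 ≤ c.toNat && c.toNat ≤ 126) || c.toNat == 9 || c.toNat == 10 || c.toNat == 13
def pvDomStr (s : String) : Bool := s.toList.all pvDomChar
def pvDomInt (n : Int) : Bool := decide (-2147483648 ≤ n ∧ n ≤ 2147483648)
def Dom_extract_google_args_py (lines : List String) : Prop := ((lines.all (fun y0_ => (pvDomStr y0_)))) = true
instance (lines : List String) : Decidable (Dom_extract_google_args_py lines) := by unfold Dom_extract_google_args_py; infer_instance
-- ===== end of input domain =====

-- B replaces A's running state machine by normalise-then-recursive block peeling; return value only, no mutation observable.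

-- ===== PORT A =====
-- " ".join(d).strip() — shared subexpression of both Pythons
def pvJoinDesc (ds : List String) : String := PySem.Str.strip (PySem.Str.join " " ds)

-- A's repeated 'if current_arg: args.append((current_arg, " ".join(current_desc).strip()))'
def pvAFlush (args : List (String × String)) (cur : Option String) (desc : List String) :
    List (String × String) :=
  match cur with
  | some a => if a ≠ "" then args ++ [(a, pvJoinDesc desc)] else args
  | none => args

-- one iteration of A's for-loop over (args, current_arg, current_desc)
def pvAStep (st : List (String × String) × Option String × List String) (line : String) :
    List (String × String) × Option String × List String :=
  let args := st.1
  let cur := st.2.1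
  let desc := st.2.2
  let stripped := PySem.Str.strip line
  if stripped = "" then (args, cur, desc)
  else if PySem.Str.isIn ":" stripped then
    -- stripped.split(":", 1); the split of a string is never empty and here has 2 parts,
    -- so the getD defaults are never used (parts[0]/parts[1] cannot raise)
    let parts := (PySem.Str.splitMax? stripped ":" 1).getD []
    let cur' := PySem.Str.strip (parts.getD 0 "")
    let p1s := PySem.Str.strip (parts.getD 1 "")
    (pvAFlush args cur desc, some cur', if parts.length > 1 ∧ p1s ≠ "" then [p1s] else [])
  else
    match cur with
    | some a => if a ≠ "" then (args, cur, desc ++ [stripped]) else (args, cur, desc)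
    | none => (args, cur, desc)

def extract_google_args_py (lines : List String) : List (String × String) :=
  let st := lines.foldl pvAStep ([], none, [])
  pvAFlush st.1 st.2.1 st.2.2

-- ===== PORT B =====
-- one iteration of Source B's bottom-up loop over (out, pending)
def pvBStep (st : List (String × String) × List String) (raw : String) :
    List (String × String) × List String :=
  let out := st.1
  let pending := st.2
  let s := PySem.Str.strip raw
  if s = "" then (out, pending)
  else if PySem.Str.isIn ":" s then
    -- s.partition(":"): s contains ':' here, so split(":", 1) has the same 2 parts
    let parts := (PySem.Str.splitMax? s ":" 1).getD []
    let name := PySem.Str.strip (parts.getD 0 "")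
    (if name ≠ "" then
       out ++ [(name, pvJoinDesc (PySem.Str.strip (parts.getD 1 "") :: pending.reverse))]
     else out, [])
  else (out, pending ++ [s])

def extract_google_args_py_alt (lines : List String) : List (String × String) :=
  -- for raw in reversed(lines): …; return out[::-1]
  (lines.reverse.foldl pvBStep ([], [])).1.reverse

-- ===== PRECONDITION & SPEC =====
def Spec_extract_google_args_py (lines : List String) (out : List (String × String)) : Prop := out = extract_google_args_py_alt lines
instance (lines : List String) (out : List (String × String)) : Decidable (Spec_extract_google_args_py lines out) := by unfold Spec_extract_google_args_py; infer_instance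

-- ===== CLAIM (what is proved, stated in full; the proofs are below) =====
def Claim_equal_extract_google_args_py : Prop := ∀ (lines : List String), Dom_extract_google_args_py lines → Spec_extract_google_args_py lines (extract_google_args_py lines)

-- ===== LEMMAS AND PROOFS =====

-- proof-only helpers -----------------------------------------------------

-- the ':'-line test, on already-stripped nonempty lines
def pvNoColon (s : String) : Bool := !PySem.Str.isIn ":" s

-- render one block, dropping it if the name is empty
def pvRender1 (n : String) (ds : List String) : List (String × String) :=
  if n = "" then [] else [(n, pvJoinDesc ds)]

-- block structure with unrendered description lists, same recursion as pvBlocks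
def pvBlocksL : List String → List (String × List String)
  | [] => []
  | head :: rest =>
    let parts := (PySem.Str.splitMax? head ":" 1).getD []
    (PySem.Str.strip (parts.getD 0 ""),
      PySem.Str.strip (parts.getD 1 "") :: rest.takeWhile pvNoColon) ::
      pvBlocksL (rest.dropWhile pvNoColon)
termination_by l => l.length
decreasing_by
  simp only [List.length_cons]
  have := List.length_dropWhile_le pvNoColon rest
  omega

def pvRenderL (bs : List (String × List String)) : List (String × String) :=
  bs.flatMap (fun b => pvRender1 b.1 b.2)

def pvResultA (st : List (String × String) × Option String × List String) :
    List (String × String) :=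
  pvAFlush st.1 st.2.1 st.2.2

-- strip is idempotent ----------------------------------------------------

lemma dropWhile_idem {α : Type} (p : α → Bool) (l : List α) :
    (l.dropWhile p).dropWhile p = l.dropWhile p := by
  induction l with
  | nil => rfl
  | cons a l ih => by_cases h : p a <;> simp [h, ih]

lemma dropWhile_prefix_fixed {α : Type} {p : α → Bool} {l t : List α}
    (hl : l.dropWhile p = l) (ht : t <+: l) : t.dropWhile p = t := by
  cases t with
  | nil => rfl
  | cons a t' =>
    obtain ⟨r, hr⟩ := ht
    have hpa : p a = false := by
      by_contra hpa
      rw [Bool.not_eq_false] at hpa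
      rw [← hr] at hl
      simp only [List.cons_append, List.dropWhile_cons, if_pos hpa] at hl
      have h1 := List.length_dropWhile_le p (t' ++ r)
      have h2 := congrArg List.length hl
      simp [List.length_append] at h1 h2
      omega
    simp [hpa]

lemma chars_strip_idem (cs : List Char) :
    PySem.Chars.strip (PySem.Chars.strip cs) = PySem.Chars.strip cs := by
  unfold PySem.Chars.strip PySem.Chars.rstrip PySem.Chars.lstrip
  have hd : (cs.dropWhile PySem.Chars.isspace).dropWhile PySem.Chars.isspace
      = cs.dropWhile PySem.Chars.isspace := dropWhile_idem _ _
  have he : ((cs.dropWhile PySem.Chars.isspace).reverse.dropWhile PySem.Chars.isspace).reverse.dropWhile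
      PySem.Chars.isspace = ((cs.dropWhile PySem.Chars.isspace).reverse.dropWhile PySem.Chars.isspace).reverse := by
    refine dropWhile_prefix_fixed hd ?_
    have hsuf : (cs.dropWhile PySem.Chars.isspace).reverse.dropWhile PySem.Chars.isspace
        <:+ (cs.dropWhile PySem.Chars.isspace).reverse := List.dropWhile_suffix _
    have := hsuf.reverse
    simpa using this
  rw [he]
  rw [List.reverse_reverse, dropWhile_idem]

lemma str_strip_idem (s : String) :
    PySem.Str.strip (PySem.Str.strip s) = PySem.Str.strip s := by
  show String.ofList (PySem.Chars.strip (PySem.Str.strip s).toList) = PySem.Str.strip s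
  rw [PySem.Str.toList_strip, chars_strip_idem]
  rfl

-- small string facts -----------------------------------------------------

lemma strip_space_cons (cs : List Char) : PySem.Chars.strip (' ' :: cs) = PySem.Chars.strip cs := by
  simp [PySem.Chars.strip, PySem.Chars.lstrip, List.dropWhile, PySem.Chars.isspace]

lemma joinDesc_cons_empty (l : List String) : pvJoinDesc ("" :: l) = pvJoinDesc l := by
  cases l with
  | nil => rfl
  | cons x xs =>
    simp [pvJoinDesc, PySem.Str.strip, PySem.Str.join, PySem.Chars.join, List.intercalate,
      strip_space_cons]

lemma pvAFlush_some (args : List (String × String)) (a : String) (desc : List String) :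
    pvAFlush args (some a) desc = args ++ pvRender1 a desc := by
  by_cases h : a = "" <;> simp [pvAFlush, pvRender1, h]

-- A's initial-fragment special case is invisible after join+strip
lemma render1_frag (m : String) (parts tw : List String) :
    pvRender1 m ((if parts.length > 1 ∧ PySem.Str.strip (parts.getD 1 "") ≠ "" then
        [PySem.Str.strip (parts.getD 1 "")] else []) ++ tw)
      = pvRender1 m (PySem.Str.strip (parts.getD 1 "") :: tw) := by
  by_cases hc : parts.length > 1 ∧ PySem.Str.strip (parts.getD 1 "") ≠ ""
  · rw [if_pos hc]; rfl
  · rw [if_neg hc]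
    have hz : PySem.Str.strip (parts.getD 1 "") = "" := by
      by_cases hl : parts.length > 1
      · by_contra hne; exact hc ⟨hl, hne⟩
      · rw [List.getD_eq_default _ _ (by omega)]; decide
    rw [hz]
    simp [pvRender1, joinDesc_cons_empty]

-- branch shapes of A's loop body ----------------------------------------

lemma pvAStep_eq_empty {args : List (String × String)} {cur : Option String} {desc : List String}
    {line : String} (h0 : PySem.Str.strip line = "") :
    pvAStep (args, cur, desc) line = (args, cur, desc) := by
  simp only [pvAStep]
  rw [if_pos h0]

lemma pvAStep_eq_colon {args : List (String × String)} {cur : Option String} {desc : List String}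
    {line : String} (h0 : ¬ PySem.Str.strip line = "")
    (h1 : PySem.Str.isIn ":" (PySem.Str.strip line) = true) :
    pvAStep (args, cur, desc) line =
      (pvAFlush args cur desc,
       some (PySem.Str.strip (((PySem.Str.splitMax? (PySem.Str.strip line) ":" 1).getD []).getD 0 "")),
       if ((PySem.Str.splitMax? (PySem.Str.strip line) ":" 1).getD []).length > 1 ∧
           PySem.Str.strip (((PySem.Str.splitMax? (PySem.Str.strip line) ":" 1).getD []).getD 1 "") ≠ "" then
         [PySem.Str.strip (((PySem.Str.splitMax? (PySem.Str.strip line) ":" 1).getD []).getD 1 "")]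
       else []) := by
  simp only [pvAStep]
  rw [if_neg h0, if_pos h1]

lemma pvAStep_eq_plain {args : List (String × String)} {cur : Option String} {desc : List String}
    {line : String} (h0 : ¬ PySem.Str.strip line = "")
    (h1 : PySem.Str.isIn ":" (PySem.Str.strip line) = false) :
    pvAStep (args, cur, desc) line =
      (match cur with
       | some a => if a ≠ "" then (args, cur, desc ++ [PySem.Str.strip line]) else (args, cur, desc)
       | none => (args, cur, desc)) := by
  simp only [pvAStep]
  rw [if_neg h0, if_neg (by rw [h1]; simp)]

-- A's fold over the raw lines equals the same fold over the normalised items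

lemma pvAStep_strip (st : List (String × String) × Option String × List String) (line : String) :
    pvAStep st (PySem.Str.strip line) = pvAStep st line := by
  simp only [pvAStep, str_strip_idem]

lemma foldA_items (lines : List String) :
    ∀ st, lines.foldl pvAStep st
      = ((lines.map PySem.Str.strip).filter (fun s => s ≠ "")).foldl pvAStep st := by
  induction lines with
  | nil => intro st; rfl
  | cons l ls ih =>
    intro st
    by_cases h : PySem.Str.strip l = ""
    · have : pvAStep st l = st := by
        rw [show st = (st.1, st.2.1, st.2.2) from rfl, pvAStep_eq_empty h]
      simp [h, this, ih]
    · simp only [List.map_cons, List.filter_cons]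
      rw [if_pos (by simpa using h)]
      simp only [List.foldl_cons, pvAStep_strip]
      exact ih _
    
lemma mem_items {lines : List String} {s : String}
    (h : s ∈ (lines.map PySem.Str.strip).filter (fun s => s ≠ "")) :
    PySem.Str.strip s = s ∧ s ≠ "" := by
  rw [List.mem_filter] at h
  obtain ⟨h1, h2⟩ := h
  rw [List.mem_map] at h1
  obtain ⟨x, _, rfl⟩ := h1
  exact ⟨str_strip_idem x, by simpa using h2⟩

-- main invariants over the normalised items ------------------------------

lemma mainSome (items : List String)
    (hmem : ∀ s ∈ items, PySem.Str.strip s = s ∧ s ≠ "") :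
    ∀ (args : List (String × String)) (n : String) (desc : List String),
      pvResultA (items.foldl pvAStep (args, some n, desc))
        = args ++ pvRender1 n (desc ++ items.takeWhile pvNoColon)
            ++ pvRenderL (pvBlocksL (items.dropWhile pvNoColon)) := by
  induction items with
  | nil =>
    intro args n desc
    simp [pvResultA, pvBlocksL, pvRenderL, pvAFlush_some]
  | cons s rest ih =>
    intro args n desc
    obtain ⟨hs, hne⟩ := hmem s (by simp)
    have ihr := ih (fun t ht => hmem t (by simp [ht]))
    simp only [List.foldl_cons]
    by_cases hcol : PySem.Str.isIn ":" s = true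
    · have h0' : ¬ PySem.Str.strip s = "" := by rw [hs]; exact hne
      have h1' : PySem.Str.isIn ":" (PySem.Str.strip s) = true := by rw [hs]; exact hcol
      rw [pvAStep_eq_colon h0' h1', hs]
      rw [ihr]
      have hnc : pvNoColon s = false := by
        rw [show pvNoColon s = !PySem.Str.isIn ":" s from rfl, hcol]; rfl
      rw [List.takeWhile_cons_of_neg (by simp [hnc]), List.dropWhile_cons_of_neg (by simp [hnc])]
      rw [show pvBlocksL (s :: rest)
            = (PySem.Str.strip (((PySem.Str.splitMax? s ":" 1).getD []).getD 0 ""),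
               PySem.Str.strip (((PySem.Str.splitMax? s ":" 1).getD []).getD 1 "")
                 :: rest.takeWhile pvNoColon) :: pvBlocksL (rest.dropWhile pvNoColon)
          from by rw [pvBlocksL]]
      rw [pvAFlush_some]
      simp only [pvRenderL, List.flatMap_cons, List.append_nil]
      rw [← pvRenderL, render1_frag]
      simp [List.append_assoc]
    · have hc' : PySem.Str.isIn ":" s = false := by
        cases h : PySem.Str.isIn ":" s
        · rfl
        · exact absurd h hcol
      have hnc : pvNoColon s = true := by
        rw [show pvNoColon s = !PySem.Str.isIn ":" s from rfl, hc']; rfl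
      have h0' : ¬ PySem.Str.strip s = "" := by rw [hs]; exact hne
      have h1' : PySem.Str.isIn ":" (PySem.Str.strip s) = false := by rw [hs]; exact hc' 
      rw [pvAStep_eq_plain h0' h1', hs]
      rw [List.takeWhile_cons_of_pos hnc, List.dropWhile_cons_of_pos hnc]
      by_cases hn : n = ""
      · subst hn
        simp only [ne_eq, not_true_eq_false, if_false]
        rw [ihr]
        simp [pvRender1]
      · simp only [ne_eq, hn, not_false_eq_true, if_true]
        rw [ihr]
        simp [List.append_assoc]

lemma mainNone (items : List String)
    (hmem : ∀ s ∈ items, PySem.Str.strip s = s ∧ s ≠ "") :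
    ∀ (args : List (String × String)) (desc : List String),
      pvResultA (items.foldl pvAStep (args, none, desc))
        = args ++ pvRenderL (pvBlocksL (items.dropWhile pvNoColon)) := by
  induction items with
  | nil =>
    intro args desc
    simp [pvResultA, pvBlocksL, pvRenderL, pvAFlush]
  | cons s rest ih =>
    intro args desc
    obtain ⟨hs, hne⟩ := hmem s (by simp)
    simp only [List.foldl_cons]
    by_cases hcol : PySem.Str.isIn ":" s = true
    · have h0' : ¬ PySem.Str.strip s = "" := by rw [hs]; exact hne
      have h1' : PySem.Str.isIn ":" (PySem.Str.strip s) = true := by rw [hs]; exact hcol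
      rw [pvAStep_eq_colon h0' h1', hs]
      rw [mainSome rest (fun t ht => hmem t (by simp [ht]))]
      have hnc : pvNoColon s = false := by
        rw [show pvNoColon s = !PySem.Str.isIn ":" s from rfl, hcol]; rfl
      rw [List.dropWhile_cons_of_neg (by simp [hnc])]
      rw [show pvBlocksL (s :: rest)
            = (PySem.Str.strip (((PySem.Str.splitMax? s ":" 1).getD []).getD 0 ""),
               PySem.Str.strip (((PySem.Str.splitMax? s ":" 1).getD []).getD 1 "")
                 :: rest.takeWhile pvNoColon) :: pvBlocksL (rest.dropWhile pvNoColon)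
          from by rw [pvBlocksL]]
      simp only [pvRenderL, List.flatMap_cons, pvAFlush]
      rw [← pvRenderL, render1_frag]
      simp [List.append_assoc]
    · have hc' : PySem.Str.isIn ":" s = false := by
        cases h : PySem.Str.isIn ":" s
        · rfl
        · exact absurd h hcol
      have hnc : pvNoColon s = true := by
        rw [show pvNoColon s = !PySem.Str.isIn ":" s from rfl, hc']; rfl
      have h0' : ¬ PySem.Str.strip s = "" := by rw [hs]; exact hne
      have h1' : PySem.Str.isIn ":" (PySem.Str.strip s) = false := by rw [hs]; exact hc' 
      rw [pvAStep_eq_plain h0' h1', hs]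
      rw [List.dropWhile_cons_of_pos hnc]
      exact ih (fun t ht => hmem t (by simp [ht])) args desc

-- B-side: the bottom-up fold over the normalised items, read off as blocks ----

lemma pvBStep_strip (st : List (String × String) × List String) (raw : String) :
    pvBStep st (PySem.Str.strip raw) = pvBStep st raw := by
  simp only [pvBStep, str_strip_idem]

lemma pvBStep_eq_empty {st : List (String × String) × List String} {raw : String}
    (h0 : PySem.Str.strip raw = "") : pvBStep st raw = st := by
  simp only [pvBStep]
  rw [if_pos h0]

lemma foldB_items (lines : List String) :
    ∀ st, lines.foldl pvBStep st
      = ((lines.map PySem.Str.strip).filter (fun s => s ≠ "")).foldl pvBStep st := by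
  induction lines with
  | nil => intro st; rfl
  | cons l ls ih =>
    intro st
    by_cases h : PySem.Str.strip l = ""
    · simp [h, pvBStep_eq_empty h, ih]
    · simp only [List.map_cons, List.filter_cons]
      rw [if_pos (by simpa using h)]
      simp only [List.foldl_cons, pvBStep_strip]
      exact ih _

lemma mainB (items : List String)
    (hmem : ∀ s ∈ items, PySem.Str.strip s = s ∧ s ≠ "") :
    items.foldr (fun s st => pvBStep st s) ([], [])
      = ((pvRenderL (pvBlocksL (items.dropWhile pvNoColon))).reverse,
         (items.takeWhile pvNoColon).reverse) := by
  induction items with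
  | nil => simp [pvBlocksL, pvRenderL]
  | cons s rest ih =>
    obtain ⟨hs, hne⟩ := hmem s (by simp)
    have ihr := ih (fun t ht => hmem t (by simp [ht]))
    simp only [List.foldr_cons, ihr]
    by_cases hcol : PySem.Str.isIn ":" s = true
    · have hnc : pvNoColon s = false := by
        rw [show pvNoColon s = !PySem.Str.isIn ":" s from rfl, hcol]; rfl
      rw [List.takeWhile_cons_of_neg (by simp [hnc]), List.dropWhile_cons_of_neg (by simp [hnc])]
      rw [show pvBlocksL (s :: rest)
            = (PySem.Str.strip (((PySem.Str.splitMax? s ":" 1).getD []).getD 0 ""),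
               PySem.Str.strip (((PySem.Str.splitMax? s ":" 1).getD []).getD 1 "")
                 :: rest.takeWhile pvNoColon) :: pvBlocksL (rest.dropWhile pvNoColon)
          from by rw [pvBlocksL]]
      simp only [pvBStep, hs]
      rw [if_neg hne, if_pos hcol]
      simp only [pvRenderL, List.flatMap_cons, List.reverse_append, List.reverse_reverse]
      by_cases hn : PySem.Str.strip (((PySem.Str.splitMax? s ":" 1).getD [])[0]?.getD "") = "" <;>
        simp [pvRender1, hn]
    · have hc' : PySem.Str.isIn ":" s = false := by
        cases h : PySem.Str.isIn ":" s
        · rfl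
        · exact absurd h hcol
      have hnc : pvNoColon s = true := by
        rw [show pvNoColon s = !PySem.Str.isIn ":" s from rfl, hc']; rfl
      rw [List.takeWhile_cons_of_pos hnc, List.dropWhile_cons_of_pos hnc]
      simp only [pvBStep, hs]
      rw [if_neg hne, if_neg (by rw [hc']; simp)]
      simp

-- ===== VERDICT (by name: the statement is the Claim_ definition above) =====
theorem extract_google_args_py_spec : Claim_equal_extract_google_args_py := by
  intro lines _
  show extract_google_args_py lines = extract_google_args_py_alt lines
  have hA : extract_google_args_py lines
      = pvResultA (((lines.map PySem.Str.strip).filter (fun s => s ≠ "")).foldl pvAStep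
          ([], none, [])) := by
    unfold extract_google_args_py pvResultA
    rw [foldA_items]
  have hB : extract_google_args_py_alt lines
      = (((lines.map PySem.Str.strip).filter (fun s => s ≠ "")).foldr
          (fun s st => pvBStep st s) ([], [])).1.reverse := by
    unfold extract_google_args_py_alt
    rw [foldB_items, List.map_reverse, List.filter_reverse, List.foldl_reverse]
  rw [hA, hB, mainB _ (fun s hs => mem_items hs), mainNone _ (fun s hs => mem_items hs) [] []]
  simp
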